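-- pv_equiv track=rewrite | github.com/Terrydaktal/wordscrape | telegram/wiktionary_define_and_collapse.py | _render_label_template
-- ===== SOURCE A (Python) =====
-- def _render_label_template(params):
--     if not params:
--         return ""
--     groups = []
--     current = []
--     for param in params:
--         if param == "_":
--             if current:
--                 groups.append(", ".join(current))
--                 current = []
--             continue
--         current.append(param)
--     if current:
--         groups.append(", ".join(current))
--     if not groups:
--         return ""
--     label = "; ".join(groups)
--     return f"({label})"
-- ===== SOURCE B (Python) =====
-- def _render_label_template(params):
--     out = ""
--     has = False
--     sep = ""
--     for p in params:
--         if p == "_":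
--             if has:
--                 sep = "; "
--         else:
--             out += sep + p
--             sep = ", "
--             has = True
--     return f"({out})" if has else ""
-- ===== Notes on version B (the rewrite author's own statement) =====
-- stated objective: simpler
-- what changed: B builds the result string directly in one pass with a pending-separator state variable, instead of A's accumulate-groups-then-join approach with list buffers and flush logic.
import Mathlib
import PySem

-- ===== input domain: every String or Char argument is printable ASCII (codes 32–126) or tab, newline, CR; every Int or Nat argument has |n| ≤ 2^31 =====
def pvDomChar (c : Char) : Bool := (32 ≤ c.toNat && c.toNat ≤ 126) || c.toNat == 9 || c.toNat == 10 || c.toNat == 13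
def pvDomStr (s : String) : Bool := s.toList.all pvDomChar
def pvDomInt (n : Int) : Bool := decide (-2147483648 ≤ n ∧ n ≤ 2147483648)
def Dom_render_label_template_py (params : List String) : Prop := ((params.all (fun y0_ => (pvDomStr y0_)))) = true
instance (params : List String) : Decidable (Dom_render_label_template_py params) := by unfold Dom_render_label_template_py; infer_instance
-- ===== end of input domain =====

-- B builds the result string directly in one pass with a pending-separator state variable,
-- instead of A's accumulate-groups-then-join approach with list buffers and flush logic.

def pvComma : List Char := [',', ' ']
def pvSemi : List Char := [';', ' ']

-- ===== PORT A =====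
-- state = (groups, current), both lists of joined/raw token character lists
def pvStepA (acc : List (List Char) × List (List Char)) (param : String) :
    List (List Char) × List (List Char) :=
  if param = "_" then
    (if acc.2 = [] then acc else (acc.1 ++ [PySem.Chars.join pvComma acc.2], []))
  else (acc.1, acc.2 ++ [param.toList])

def render_label_template_py (params : List String) : String :=
  if params = [] then "" else
    let st := params.foldl pvStepA ([], [])
    let groups := if st.2 = [] then st.1 else st.1 ++ [PySem.Chars.join pvComma st.2]
    if groups = [] then ""
    else String.ofList ('(' :: (PySem.Chars.join pvSemi groups ++ [')']))

-- ===== PORT B =====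
-- state = (out, has, sep): the output so far, whether any real token was seen, next separator
def pvStepB (acc : List Char × Bool × List Char) (p : String) : List Char × Bool × List Char :=
  if p = "_" then
    (if acc.2.1 then (acc.1, true, pvSemi) else acc)
  else (acc.1 ++ acc.2.2 ++ p.toList, true, pvComma)

def render_label_template_py_alt (params : List String) : String :=
  let st := params.foldl pvStepB ([], false, [])
  if st.2.1 then String.ofList ('(' :: (st.1 ++ [')'])) else ""

-- ===== PRECONDITION & SPEC =====
def Spec_render_label_template_py (params : List String) (out : String) : Prop := out = render_label_template_py_alt params
instance (params : List String) (out : String) : Decidable (Spec_render_label_template_py params out) := by unfold Spec_render_label_template_py; infer_instance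

-- ===== CLAIM (what is proved, stated in full; the proofs are below) =====
def Claim_equal_render_label_template_py : Prop := ∀ (params : List String), Dom_render_label_template_py params → Spec_render_label_template_py params (render_label_template_py params)

-- ===== LEMMAS AND PROOFS =====

lemma pv_join_snoc (sep : List Char) (xs : List (List Char)) (x : List Char) :
    PySem.Chars.join sep (xs ++ [x])
      = (if xs = [] then ([] : List Char) else PySem.Chars.join sep xs ++ sep) ++ x := by
  induction xs with
  | nil => simp [PySem.Chars.join_singleton]
  | cons h t ih =>
    cases t with
    | nil => simp [PySem.Chars.join_cons_cons, PySem.Chars.join_singleton]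
    | cons h2 t2 =>
      simp only [List.cons_append, PySem.Chars.join_cons_cons]
      rw [show h2 :: (t2 ++ [x]) = (h2 :: t2) ++ [x] from rfl, ih]
      simp [List.append_assoc]

-- invariant relating A's (groups, current) to B's (out, has, sep)
def pvInv (g c : List (List Char)) (out : List Char) (has : Bool) (sep : List Char) : Prop :=
  out = PySem.Chars.join pvSemi (g ++ (if c = [] then [] else [PySem.Chars.join pvComma c])) ∧
  (has = true ↔ (g ≠ [] ∨ c ≠ [])) ∧
  (if has then sep = (if c = [] then pvSemi else pvComma) else sep = [] ∧ g = [] ∧ c = [])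

lemma pvInv_step (g c : List (List Char)) (out : List Char) (has : Bool) (sep : List Char)
    (p : String) (h : pvInv g c out has sep) :
    pvInv (pvStepA (g, c) p).1 (pvStepA (g, c) p).2
      (pvStepB (out, has, sep) p).1 (pvStepB (out, has, sep) p).2.1
      (pvStepB (out, has, sep) p).2.2 := by
  obtain ⟨hout, hhas, hsep⟩ := h
  by_cases hp : p = "_"
  · by_cases hc : c = []
    · subst hc
      cases has with
      | false => simp_all [pvStepA, pvStepB, pvInv]
      | true =>
        simp only [hp, pvStepA, pvStepB]
        simp only [if_true] at hsep ⊢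
        refine ⟨?_, ?_, ?_⟩ <;> simp_all
    · have hhas' : has = true := hhas.mpr (Or.inr hc)
      subst hhas'
      simp only [hp, pvStepA, pvStepB, if_neg hc, if_true]
      refine ⟨?_, ?_, ?_⟩
      · simpa [hc] using hout
      · simp
      · simp
  · -- real token: A appends to current, B appends sep + token to out
    simp only [pvStepA, pvStepB, if_neg hp]
    refine ⟨?_, ?_, ?_⟩
    · -- out ++ sep ++ p = join pvSemi (g ++ [join pvComma (c ++ [p.toList])])
      by_cases hc : c = []
      · subst hc
        cases has with
        | false =>
          obtain ⟨hs, hg, -⟩ := hsep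
          subst hs; subst hg
          simp [hout, PySem.Chars.join_singleton]
        | true =>
          have hg : g ≠ [] := by
            rcases hhas.mp rfl with h' | h'
            · exact h'
            · exact absurd rfl h'
          simp only [if_true] at hsep
          subst hsep
          have h1 : PySem.Chars.join pvSemi (g ++ [p.toList])
              = PySem.Chars.join pvSemi g ++ pvSemi ++ p.toList := by
            rw [pv_join_snoc]; simp [hg, List.append_assoc]
          simp [hout, h1, PySem.Chars.join_singleton, List.append_assoc]
      · have hhas' : has = true := hhas.mpr (Or.inr hc)
        subst hhas'
        simp only [if_true, if_neg hc] at hsep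
        subst hsep
        have hc2 : c ++ [p.toList] ≠ [] := by simp
        simp only [hout, if_neg hc, if_neg hc2]
        rw [pv_join_snoc pvSemi g, pv_join_snoc pvSemi g, pv_join_snoc pvComma c]
        simp [hc, List.append_assoc]
    · simp
    · simp

lemma pvInv_fold (params : List String) :
    ∀ (g c : List (List Char)) (out : List Char) (has : Bool) (sep : List Char),
      pvInv g c out has sep →
      pvInv (params.foldl pvStepA (g, c)).1 (params.foldl pvStepA (g, c)).2
        (params.foldl pvStepB (out, has, sep)).1
        (params.foldl pvStepB (out, has, sep)).2.1
        (params.foldl pvStepB (out, has, sep)).2.2 := by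
  induction params with
  | nil => intro g c out has sep h; simpa using h
  | cons p rest ih =>
    intro g c out has sep h
    have hstep := pvInv_step g c out has sep p h
    have := ih (pvStepA (g, c) p).1 (pvStepA (g, c) p).2
        (pvStepB (out, has, sep) p).1 (pvStepB (out, has, sep) p).2.1
        (pvStepB (out, has, sep) p).2.2 hstep
    simpa using this

lemma pvInv_init : pvInv [] [] [] false [] := by
  simp [pvInv, PySem.Chars.join_nil]

-- ===== VERDICT (by name: the statement is the Claim_ definition above) =====
theorem render_label_template_py_spec : Claim_equal_render_label_template_py := by
  intro params _
  unfold Spec_render_label_template_py render_label_template_py render_label_template_py_alt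
  have h := pvInv_fold params [] [] [] false [] pvInv_init
  set stA := params.foldl pvStepA ([], []) with hA
  set stB := params.foldl pvStepB ([], false, []) with hB
  obtain ⟨hout, hhas, -⟩ := h
  by_cases hp : params = []
  · subst hp
    simp [hB]
  · simp only [if_neg hp]
    by_cases hb : stB.2.1 = true
    · have hne : (if stA.2 = [] then stA.1 else stA.1 ++ [PySem.Chars.join pvComma stA.2]) ≠ [] := by
        rcases hhas.mp hb with h' | h'
        · split <;> simp [h']
        · simp [if_neg h']
      simp only [hb, if_true, if_neg hne]
      have : PySem.Chars.join pvSemi (if stA.2 = [] then stA.1 else stA.1 ++ [PySem.Chars.join pvComma stA.2]) = stB.1 := by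
        rw [hout]
        by_cases hc : stA.2 = [] <;> simp [hc]
      rw [this]
    · have hb' : stB.2.1 = false := by simpa using hb
      have hg : stA.1 = [] ∧ stA.2 = [] := by
        by_contra hcon
        have : stA.1 ≠ [] ∨ stA.2 ≠ [] := by tauto
        have := hhas.mpr this
        simp [hb'] at this
      simp [hb', hg.1, hg.2]
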